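-- pv_equiv track=rewrite | github.com/Griga178/samples | ozon/3n.py | drow_hex_v3
-- ===== SOURCE A (Python) =====
-- def drow_hex_v3(w, h) -> list:
--     # шапка
--     curFig = []
--     header = ["x" for __ in range(h)]
--     for __ in range(w):
--         header.append("_")
--     curFig.append(header)
--
--     # body верх
--     curMargin = h-1
--     curDopWidth = 0
--     for __ in range(h):
--         row_body_top = ["x"] * curMargin
--         row_body_top += "/"
--         row_body_top += " " * curDopWidth
--         row_body_top += " " * w
--         row_body_top += "\\"
--         curMargin -= 1
--         curDopWidth += 2
--         curFig.append(row_body_top)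
--     # body низ
--     row_body_bot = []
--     for __ in range(h-1):
--         curDopWidth -= 2
--         curMargin += 1
--         row_body_bot = ["x"] * curMargin
--         row_body_bot += "\\"
--         row_body_bot += " " * curDopWidth
--         row_body_bot += " " * w
--         row_body_bot += "/"
--         curFig.append(row_body_bot)
--     # низ
--     botom = ["x"] * (curMargin+1)
--     botom += "\\"
--     botom += ["_"] * (w)
--     botom += "/"
--     curFig.append(botom)
--     return curFig
-- ===== SOURCE B (Python) =====
-- def drow_hex_v3(w, h) -> list:
--     header = ["x"] * h + ["_"] * w
--     top = [["x"] * (h - 1 - i) + ["/"] + [" "] * (2 * i) + [" "] * w + ["\\"]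
--            for i in range(h)]
--     mirrored = [[("\\" if c == "/" else "/" if c == "\\" else c) for c in row]
--                 for row in reversed(top[1:])]
--     footer = ["x"] * (h - 1) + ["\\"] + ["_"] * w + ["/"]
--     return [header] + top + mirrored + [footer]
-- ===== Notes on version B (the rewrite author's own statement) =====
-- stated objective: alternative
-- what changed: Replaces the two stateful margin/width-accumulator loops by a declarative build: comprehensions for the top rows, and the bottom rows produced by mirroring the already-built top rows (reversed, slash characters swapped) instead of recomputing them arithmetically.
import Mathlib
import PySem

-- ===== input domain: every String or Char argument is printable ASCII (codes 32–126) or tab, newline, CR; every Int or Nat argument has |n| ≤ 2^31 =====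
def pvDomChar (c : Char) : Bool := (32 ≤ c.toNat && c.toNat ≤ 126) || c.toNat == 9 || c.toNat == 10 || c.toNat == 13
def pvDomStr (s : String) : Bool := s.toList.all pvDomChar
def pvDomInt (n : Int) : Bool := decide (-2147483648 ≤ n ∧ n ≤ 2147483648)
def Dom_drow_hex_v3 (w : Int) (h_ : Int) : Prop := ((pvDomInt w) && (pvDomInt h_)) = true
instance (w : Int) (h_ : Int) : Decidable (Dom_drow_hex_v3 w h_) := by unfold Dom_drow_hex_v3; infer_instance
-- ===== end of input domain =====

-- B replaces A's two stateful margin/width-accumulator loops by a declarative build: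
-- top rows by comprehension, bottom rows obtained by mirroring the already-built top rows
-- (reversed, '/'↔'\' swapped); same cost, different decomposition (objective: alternative).

-- ===== PORT A =====
-- literal transliteration of A: header, then two stateful loops over (fig, curMargin, curDopWidth), then footer.
-- Python list multiplication ["x"]*k with possibly negative k is List.replicate k.toNat (both give [] for k ≤ 0).
def drow_hex_v3 (w : Int) (h_ : Int) : List (List String) :=
  let header := List.replicate h_.toNat "x" ++ List.replicate w.toNat "_"
  let curFig : List (List String) := [header]
  let s1 := (List.range h_.toNat).foldl
    (fun (st : List (List String) × Int × Int) _ =>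
      let row := List.replicate st.2.1.toNat "x" ++ ["/"] ++ List.replicate st.2.2.toNat " "
                   ++ List.replicate w.toNat " " ++ ["\\"]
      (st.1 ++ [row], st.2.1 - 1, st.2.2 + 2)) (curFig, h_ - 1, 0)
  let s2 := (List.range (h_ - 1).toNat).foldl
    (fun (st : List (List String) × Int × Int) _ =>
      let row := List.replicate (st.2.1 + 1).toNat "x" ++ ["\\"] ++ List.replicate (st.2.2 - 2).toNat " "
                   ++ List.replicate w.toNat " " ++ ["/"]
      (st.1 ++ [row], st.2.1 + 1, st.2.2 - 2)) s1
  let botom := List.replicate (s2.2.1 + 1).toNat "x" ++ ["\\"] ++ List.replicate w.toNat "_" ++ ["/"]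
  s2.1 ++ [botom]

-- ===== PORT B =====
-- B-side helper: the conditional expression ("\\" if c == "/" else "/" if c == "\\" else c)
def pvMirrorChar (c : String) : String := if c = "/" then "\\" else if c = "\\" then "/" else c

def drow_hex_v3_alt (w : Int) (h_ : Int) : List (List String) :=
  let header := List.replicate h_.toNat "x" ++ List.replicate w.toNat "_"
  let top := (List.range h_.toNat).map (fun (i : Nat) =>
    List.replicate (h_ - 1 - (i : Int)).toNat "x" ++ ["/"] ++ List.replicate (2 * i) " "
      ++ List.replicate w.toNat " " ++ ["\\"])
  let mirrored := ((top.drop 1).reverse).map (fun row => row.map pvMirrorChar)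
  let footer := List.replicate (h_ - 1).toNat "x" ++ ["\\"] ++ List.replicate w.toNat "_" ++ ["/"]
  [header] ++ top ++ mirrored ++ [footer]

-- ===== PRECONDITION & SPEC =====
def Spec_drow_hex_v3 (w : Int) (h_ : Int) (out : List (List String)) : Prop := out = drow_hex_v3_alt w h_
instance (w : Int) (h_ : Int) (out : List (List String)) : Decidable (Spec_drow_hex_v3 w h_ out) := by unfold Spec_drow_hex_v3; infer_instance

-- ===== CLAIM (what is proved, stated in full; the proofs are below) =====
def Claim_equal_drow_hex_v3 : Prop := ∀ (w : Int) (h_ : Int), Dom_drow_hex_v3 w h_ → Spec_drow_hex_v3 w h_ (drow_hex_v3 w h_)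

-- ===== LEMMAS AND PROOFS =====

-- characterisation of A's top-body loop
theorem topFold (w : Int) (n : Nat) (fig : List (List String)) (m d : Int) :
    (List.range n).foldl
      (fun (st : List (List String) × Int × Int) _ =>
        let row := List.replicate st.2.1.toNat "x" ++ ["/"] ++ List.replicate st.2.2.toNat " "
                     ++ List.replicate w.toNat " " ++ ["\\"]
        (st.1 ++ [row], st.2.1 - 1, st.2.2 + 2)) (fig, m, d)
    = (fig ++ (List.range n).map (fun (i : Nat) =>
         List.replicate (m - (i : Int)).toNat "x" ++ ["/"] ++ List.replicate (d + 2 * (i : Int)).toNat " "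
           ++ List.replicate w.toNat " " ++ ["\\"]),
       m - n, d + 2 * n) := by
  induction n with
  | zero => simp
  | succ k ih =>
    rw [List.range_succ, List.foldl_append, ih]
    simp only [List.foldl_cons, List.foldl_nil, List.map_append, List.map_cons, List.map_nil,
      List.append_assoc, Prod.mk.injEq]
    exact ⟨trivial, by push_cast; ring, by push_cast; ring⟩

-- characterisation of A's bottom-body loop
theorem botFold (w : Int) (n : Nat) (fig : List (List String)) (m d : Int) :
    (List.range n).foldl
      (fun (st : List (List String) × Int × Int) _ =>
        let row := List.replicate (st.2.1 + 1).toNat "x" ++ ["\\"] ++ List.replicate (st.2.2 - 2).toNat " "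
                     ++ List.replicate w.toNat " " ++ ["/"]
        (st.1 ++ [row], st.2.1 + 1, st.2.2 - 2)) (fig, m, d)
    = (fig ++ (List.range n).map (fun (j : Nat) =>
         List.replicate (m + (j : Int) + 1).toNat "x" ++ ["\\"] ++ List.replicate (d - 2 * (j : Int) - 2).toNat " "
           ++ List.replicate w.toNat " " ++ ["/"]),
       m + n, d - 2 * n) := by
  induction n with
  | zero => simp
  | succ k ih =>
    rw [List.range_succ, List.foldl_append, ih]
    simp only [List.foldl_cons, List.foldl_nil, List.map_append, List.map_cons, List.map_nil,
      List.append_assoc, Prod.mk.injEq]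
    exact ⟨trivial, by push_cast; ring, by push_cast; ring⟩

-- ===== VERDICT (by name: the statement is the Claim_ definition above) =====
theorem drow_hex_v3_spec : Claim_equal_drow_hex_v3 := by
  intro w h_ _
  unfold Spec_drow_hex_v3 drow_hex_v3 drow_hex_v3_alt
  dsimp only
  rw [topFold, botFold]
  simp only [List.append_assoc, List.cons_append, List.nil_append]
  rcases le_or_gt h_ 0 with hle | hpos
  · have h0 : h_.toNat = 0 := by omega
    have h1 : (h_ - 1).toNat = 0 := by omega
    simp [h0, h1]
  · obtain ⟨m, hm⟩ : ∃ m, h_.toNat = m + 1 := ⟨h_.toNat - 1, by omega⟩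
    have hh : h_ = (m : Int) + 1 := by omega
    have hk : (h_ - 1).toNat = m := by omega
    rw [hm, hk]
    congr 1
    congr 1
    · apply List.map_congr_left
      intro i _
      have e : (0 + 2 * (i : Int)).toNat = 2 * i := by omega
      rw [e]
    congr 1
    · rw [List.range_succ_eq_map]
      simp only [List.map_cons, List.drop_succ_cons, List.drop_zero, List.map_map,
        ← List.map_reverse, List.range_eq_range', List.reverse_range', List.map_map]
      apply List.map_congr_left
      intro j hj
      rw [List.mem_range'] at hj
      simp only [Function.comp]
      obtain ⟨i, hi, hji⟩ := hj
      have hjm : j < m := by omega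
      simp only [List.map_append, List.map_replicate, List.map_cons, List.map_nil, pvMirrorChar]
      have e1 : (h_ - 1 - (((0 + m - 1 - j).succ : Nat) : Int)).toNat
          = (h_ - 1 - (((m + 1 : Nat) : Nat) : Int) + (j : Int) + 1).toNat := by omega
      have e2 : 2 * (0 + m - 1 - j).succ
          = (0 + 2 * (((m + 1 : Nat) : Nat) : Int) - 2 * (j : Int) - 2).toNat := by omega
      rw [e1, e2]
      simp only [String.reduceEq, reduceIte]
    · have e : (h_ - 1 - (((m + 1 : Nat) : Nat) : Int) + (m : Int) + 1).toNat = m := by omega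
      rw [e]
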